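-- pv_equiv track=rewrite | github.com/GonzaloTQ/python | practico.py | cantidad_ap_antes_corte
-- ===== SOURCE A (Python) =====
-- def cantidad_ap_antes_corte(c: str, s: str) -> int:
--     contador: int = 0
--     for char in s:
--         if char == c:
--             contador += 1
--         if char == "x":
--             return contador
--     return contador
-- ===== SOURCE B (Python) =====
-- def cantidad_ap_antes_corte(c: str, s: str) -> int:
--     before, sep, _ = s.partition("x")
--     return sum(ch == c for ch in before + sep)
-- ===== Notes on version B (the rewrite author's own statement) =====
-- stated objective: idiomatic
-- what changed: Replaces the manual early-exit counting loop with a locate-then-count decomposition: str.partition at the first 'x' and a sum over the kept prefix (sep included, so the terminating 'x' is counted when c == 'x', as in A).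
import Mathlib
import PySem

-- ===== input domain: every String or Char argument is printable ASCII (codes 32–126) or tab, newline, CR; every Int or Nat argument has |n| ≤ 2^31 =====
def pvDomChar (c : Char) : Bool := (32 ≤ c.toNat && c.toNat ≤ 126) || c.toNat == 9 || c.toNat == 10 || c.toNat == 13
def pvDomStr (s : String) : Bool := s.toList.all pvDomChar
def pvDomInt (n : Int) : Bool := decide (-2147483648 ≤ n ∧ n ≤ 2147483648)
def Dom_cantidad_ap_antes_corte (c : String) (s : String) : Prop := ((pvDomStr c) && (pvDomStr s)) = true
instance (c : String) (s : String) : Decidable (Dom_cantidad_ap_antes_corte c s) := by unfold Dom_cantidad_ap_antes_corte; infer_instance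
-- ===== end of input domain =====

-- B replaces A's manual early-exit counting loop by a partition-at-first-'x' then count decomposition (same cost).

-- ===== PORT A =====
-- the 'for char in s' loop with its early 'return'
def pvGoA (c : String) : List Char → Int → Int
  | [], contador => contador
  | ch :: t, contador =>
    let contador' := if String.mk [ch] = c then contador + 1 else contador
    if ch = 'x' then contador' else pvGoA c t contador'

def cantidad_ap_antes_corte (c : String) (s : String) : Int := pvGoA c s.toList 0

-- ===== PORT B =====
-- s.partition("x") for the one-char separator "x", hand-ported (PySem has no partition; exact:
-- before = the chars strictly before the first 'x', sep = "x" if 'x' occurs in s else "")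
def cantidad_ap_antes_corte_alt (c : String) (s : String) : Int :=
  let before := s.toList.takeWhile (fun ch => ch ≠ 'x')
  let sep : List Char := if 'x' ∈ s.toList then ['x'] else []
  -- sum(ch == c for ch in before + sep)
  ((before ++ sep).map (fun ch => if String.mk [ch] = c then (1 : Int) else 0)).sum

-- ===== PRECONDITION & SPEC =====
def Spec_cantidad_ap_antes_corte (c : String) (s : String) (out : Int) : Prop := out = cantidad_ap_antes_corte_alt c s
instance (c : String) (s : String) (out : Int) : Decidable (Spec_cantidad_ap_antes_corte c s out) := by unfold Spec_cantidad_ap_antes_corte; infer_instance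

-- ===== CLAIM (what is proved, stated in full; the proofs are below) =====
def Claim_equal_cantidad_ap_antes_corte : Prop := ∀ (c : String) (s : String), Dom_cantidad_ap_antes_corte c s → Spec_cantidad_ap_antes_corte c s (cantidad_ap_antes_corte c s)

-- ===== LEMMAS AND PROOFS =====
theorem pvGoA_eq (c : String) (l : List Char) (a : Int) :
    pvGoA c l a =
      a + ((l.takeWhile (fun ch => ch ≠ 'x') ++ if 'x' ∈ l then ['x'] else []).map
            (fun ch => if String.mk [ch] = c then (1 : Int) else 0)).sum := by
  induction l generalizing a with
  | nil => simp [pvGoA]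
  | cons ch t ih =>
    by_cases hx : ch = 'x'
    · subst hx
      simp [pvGoA, List.takeWhile]
      split_ifs <;> simp_all [eq_comm]
    · simp [pvGoA, hx, ih, List.takeWhile]
      split_ifs <;> simp_all [eq_comm] <;> try ring

-- ===== VERDICT (by name: the statement is the Claim_ definition above) =====
theorem cantidad_ap_antes_corte_spec : Claim_equal_cantidad_ap_antes_corte := by
  intro c s _
  show cantidad_ap_antes_corte c s = cantidad_ap_antes_corte_alt c s
  simp [cantidad_ap_antes_corte, cantidad_ap_antes_corte_alt, pvGoA_eq]
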